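-- pv_equiv track=rewrite | github.com/MaximHirschmann/project-euler-solutions | Python/798.py | winner_best_play
-- ===== SOURCE A (Python) =====
-- def other(player):
--     return -player
--
-- def winner_best_play(visible, deck, player=1):
--     if visible == [] or deck == []:
--         return other(player)
--
--     for card_chosen in deck:
--         for stack_chosen in visible:
--             if stack_chosen[1] != card_chosen[1] or stack_chosen[0] > card_chosen[0]: # you cant put that card on top of the other one
--                 continue
--             new_visible = [card_chosen if card == stack_chosen else card for card in visible]
--             new_deck = [card for card in deck if card != card_chosen]
--             res = winner_best_play(new_visible, new_deck, other(player))
--             if res == player: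
--                 return player
--
--     return other(player)
-- ===== SOURCE B (Python) =====
-- def winner_best_play(visible, deck, player=1):
--     # Memoized boolean negamax: wins(v, d) says whether the player to move wins;
--     # the player label is applied once at the end instead of threaded through.
--     memo = {}
--
--     def wins(visible, deck):
--         if not visible or not deck:
--             return False
--         key = (tuple(map(tuple, visible)), tuple(map(tuple, deck)))
--         if key in memo:
--             return memo[key]
--         result = any(
--             not wins([card if c == stack else c for c in visible],
--                      [c for c in deck if c != card])
--             for card in deck
--             for stack in visible
--             if stack[1] == card[1] and stack[0] <= card[0]
--         )
--         memo[key] = result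
--         return result
--
--     return player if wins(visible, deck) else -player
-- ===== Notes on version B (the rewrite author's own statement) =====
-- stated objective: faster
-- what changed: A's naive negamax (which threads the player label through the recursion and early-returns on res == player) is replaced by a player-free boolean 'mover wins' recursion memoized on the canonical (visible, deck) state, turning the exponential search into DP over distinct states, with the player label applied once at the end.
import Mathlib
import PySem

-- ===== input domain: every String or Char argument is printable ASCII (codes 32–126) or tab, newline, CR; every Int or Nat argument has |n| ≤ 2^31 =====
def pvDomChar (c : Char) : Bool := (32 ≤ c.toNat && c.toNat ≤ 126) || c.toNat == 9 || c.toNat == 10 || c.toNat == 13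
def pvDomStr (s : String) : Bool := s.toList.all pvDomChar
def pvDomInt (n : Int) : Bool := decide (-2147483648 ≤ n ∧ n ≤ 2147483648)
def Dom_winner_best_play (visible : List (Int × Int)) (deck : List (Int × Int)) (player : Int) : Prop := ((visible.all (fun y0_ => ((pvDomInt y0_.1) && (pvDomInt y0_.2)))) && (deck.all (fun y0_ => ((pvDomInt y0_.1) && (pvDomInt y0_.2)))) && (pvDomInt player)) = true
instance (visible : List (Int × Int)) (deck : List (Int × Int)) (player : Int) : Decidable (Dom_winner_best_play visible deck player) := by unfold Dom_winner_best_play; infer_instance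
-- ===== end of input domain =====

-- B replaces A's naive negamax (which threads the player label through the recursion)
-- by a player-free boolean "mover wins" recursion memoized on the (visible, deck) state.

-- termination helper used by the ports (deck strictly shrinks when a chosen card is removed)
theorem pvFilterNeLt (c : Int × Int) (l : List (Int × Int)) (h : c ∈ l) :
    (l.filter (fun x => x != c)).length < l.length := by
  induction l with
  | nil => cases h
  | cons a t ih =>
    simp only [List.filter_cons]
    rcases List.mem_cons.mp h with rfl | hm
    · simp only [bne_self_eq_false, List.length_cons]
      exact Nat.lt_succ_of_le (List.length_filter_le _ _)
    · by_cases ha : (a != c) = true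
      · simp [ha, ih hm]
      · simp only [ha, List.length_cons]
        exact Nat.lt_succ_of_lt (ih hm)

-- ===== PORT A =====
-- literal transliteration of A: nested for-loops with `continue` and early `return player`
-- become Option-valued loop helpers (`some r` = early return); the membership proof
-- arguments are only termination guards.
mutual
def winner_best_play (visible : List (Int × Int)) (deck : List (Int × Int)) (player : Int) : Int :=
  if visible = [] ∨ deck = [] then -player
  else
    match pvLoopDeckA visible deck player deck (fun _ h => h) with
    | some r => r
    | none => -player
termination_by (deck.length, 3, 0)
decreasing_by exact Prod.Lex.right _ (Prod.Lex.left _ _ (by omega))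

def pvLoopDeckA (visible deck : List (Int × Int)) (player : Int)
    (ds : List (Int × Int)) (hds : ∀ c, c ∈ ds → c ∈ deck) : Option Int :=
  match ds with
  | [] => none
  | c :: rest =>
    match pvLoopStackA visible deck player c (hds c (List.mem_cons_self)) visible with
    | some r => some r
    | none => pvLoopDeckA visible deck player rest (fun x hx => hds x (List.mem_cons_of_mem _ hx))
termination_by (deck.length, 2, ds.length)
decreasing_by
  · exact Prod.Lex.right _ (Prod.Lex.left _ _ (by omega))
  · exact Prod.Lex.right _ (Prod.Lex.right _ (by simp only [List.length_cons]; omega))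

def pvLoopStackA (visible deck : List (Int × Int)) (player : Int)
    (c : Int × Int) (hc : c ∈ deck) (vs : List (Int × Int)) : Option Int :=
  match vs with
  | [] => none
  | s :: rest =>
    if s.2 ≠ c.2 ∨ s.1 > c.1 then pvLoopStackA visible deck player c hc rest
    else
      let nv := visible.map (fun x => if x = s then c else x)
      let nd := deck.filter (fun x => x != c)
      if winner_best_play nv nd (-player) = player then some player
      else pvLoopStackA visible deck player c hc rest
termination_by (deck.length, 1, vs.length)
decreasing_by
  · exact Prod.Lex.right _ (Prod.Lex.right _ (by simp only [List.length_cons]; omega))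
  · exact Prod.Lex.left _ _ (by
      have h := pvFilterNeLt c deck hc
      rw [← List.countP_eq_length_filter] at h
      simp only [List.length_unattach, ← List.countP_eq_length_filter]
      try rw [List.countP_attach (p := fun x => x != c)]
      omega)
  · exact Prod.Lex.right _ (Prod.Lex.right _ (by simp only [List.length_cons]; omega))
end

-- ===== PORT B =====
-- memo : canonical state (visible, deck) ↦ "the player to move wins"
mutual
def pvWinsB (visible deck : List (Int × Int))
    (memo : PySem.Dict (List (Int × Int) × List (Int × Int)) Bool) :
    Bool × PySem.Dict (List (Int × Int) × List (Int × Int)) Bool :=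
  if visible = [] ∨ deck = [] then (false, memo)
  else
    match memo.get? (visible, deck) with
    | some b => (b, memo)
    | none =>
      let r := pvAnyDeckB visible deck deck (fun _ h => h) memo
      (r.1, r.2.insert (visible, deck) r.1)
termination_by (deck.length, 3, 0)
decreasing_by exact Prod.Lex.right _ (Prod.Lex.left _ _ (by omega))

def pvAnyDeckB (visible deck : List (Int × Int))
    (ds : List (Int × Int)) (hds : ∀ c, c ∈ ds → c ∈ deck)
    (memo : PySem.Dict (List (Int × Int) × List (Int × Int)) Bool) :
    Bool × PySem.Dict (List (Int × Int) × List (Int × Int)) Bool :=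
  match ds with
  | [] => (false, memo)
  | c :: rest =>
    let r := pvAnyStackB visible deck c (hds c (List.mem_cons_self)) visible memo
    if r.1 then r
    else pvAnyDeckB visible deck rest (fun x hx => hds x (List.mem_cons_of_mem _ hx)) r.2
termination_by (deck.length, 2, ds.length)
decreasing_by
  · exact Prod.Lex.right _ (Prod.Lex.left _ _ (by omega))
  · exact Prod.Lex.right _ (Prod.Lex.right _ (by simp only [List.length_cons]; omega))

def pvAnyStackB (visible deck : List (Int × Int))
    (c : Int × Int) (hc : c ∈ deck) (vs : List (Int × Int))
    (memo : PySem.Dict (List (Int × Int) × List (Int × Int)) Bool) :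
    Bool × PySem.Dict (List (Int × Int) × List (Int × Int)) Bool :=
  match vs with
  | [] => (false, memo)
  | s :: rest =>
    if s.2 = c.2 ∧ s.1 ≤ c.1 then
      let nv := visible.map (fun x => if x = s then c else x)
      let nd := deck.filter (fun x => x != c)
      let r := pvWinsB nv nd memo
      if !r.1 then (true, r.2)
      else pvAnyStackB visible deck c hc rest r.2
    else pvAnyStackB visible deck c hc rest memo
termination_by (deck.length, 1, vs.length)
decreasing_by
  · exact Prod.Lex.left _ _ (by
      have h := pvFilterNeLt c deck hc
      rw [← List.countP_eq_length_filter] at h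
      simp only [List.length_unattach, ← List.countP_eq_length_filter]
      try rw [List.countP_attach (p := fun x => x != c)]
      omega)
  · exact Prod.Lex.right _ (Prod.Lex.right _ (by simp only [List.length_cons]; omega))
  · exact Prod.Lex.right _ (Prod.Lex.right _ (by simp only [List.length_cons]; omega))
end

def winner_best_play_alt (visible : List (Int × Int)) (deck : List (Int × Int)) (player : Int) : Int :=
  if (pvWinsB visible deck PySem.Dict.empty).1 then player else -player

-- ===== PRECONDITION & SPEC =====
def Spec_winner_best_play (visible : List (Int × Int)) (deck : List (Int × Int)) (player : Int) (out : Int) : Prop := out = winner_best_play_alt visible deck player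
instance (visible : List (Int × Int)) (deck : List (Int × Int)) (player : Int) (out : Int) : Decidable (Spec_winner_best_play visible deck player out) := by unfold Spec_winner_best_play; infer_instance

-- ===== CLAIM (what is proved, stated in full; the proofs are below) =====
def Claim_equal_winner_best_play : Prop := ∀ (visible : List (Int × Int)) (deck : List (Int × Int)) (player : Int), Dom_winner_best_play visible deck player → Spec_winner_best_play visible deck player (winner_best_play visible deck player)

-- ===== LEMMAS AND PROOFS =====

-- proof-side helper: B's boolean recursion without the memo table
mutual
def pvWinsN (visible deck : List (Int × Int)) : Bool :=
  if visible = [] ∨ deck = [] then false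
  else pvAnyDeckN visible deck deck (fun _ h => h)
termination_by (deck.length, 3, 0)
decreasing_by exact Prod.Lex.right _ (Prod.Lex.left _ _ (by omega))

def pvAnyDeckN (visible deck : List (Int × Int))
    (ds : List (Int × Int)) (hds : ∀ c, c ∈ ds → c ∈ deck) : Bool :=
  match ds with
  | [] => false
  | c :: rest =>
    pvAnyStackN visible deck c (hds c (List.mem_cons_self)) visible
      || pvAnyDeckN visible deck rest (fun x hx => hds x (List.mem_cons_of_mem _ hx))
termination_by (deck.length, 2, ds.length)
decreasing_by
  · exact Prod.Lex.right _ (Prod.Lex.left _ _ (by omega))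
  · exact Prod.Lex.right _ (Prod.Lex.right _ (by simp only [List.length_cons]; omega))

def pvAnyStackN (visible deck : List (Int × Int))
    (c : Int × Int) (hc : c ∈ deck) (vs : List (Int × Int)) : Bool :=
  match vs with
  | [] => false
  | s :: rest =>
    if s.2 = c.2 ∧ s.1 ≤ c.1 then
      (!pvWinsN (visible.map (fun x => if x = s then c else x)) (deck.filter (fun x => x != c)))
        || pvAnyStackN visible deck c hc rest
    else pvAnyStackN visible deck c hc rest
termination_by (deck.length, 1, vs.length)
decreasing_by
  · exact Prod.Lex.left _ _ (by
      have h := pvFilterNeLt c deck hc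
      rw [← List.countP_eq_length_filter] at h
      simp only [List.length_unattach, ← List.countP_eq_length_filter]
      try rw [List.countP_attach (p := fun x => x != c)]
      omega)
  · exact Prod.Lex.right _ (Prod.Lex.right _ (by simp only [List.length_cons]; omega))
  · exact Prod.Lex.right _ (Prod.Lex.right _ (by simp only [List.length_cons]; omega))
end

-- A: every early return of the loops carries the current player label
theorem pvStackA_some (v d : List (Int × Int)) (p : Int) (c : Int × Int) (hc : c ∈ d) :
    ∀ vs r, pvLoopStackA v d p c hc vs = some r → r = p := by
  intro vs
  induction vs with
  | nil => intro r h; simp [pvLoopStackA] at h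
  | cons s rest ih =>
    intro r h
    rw [pvLoopStackA] at h
    dsimp only at h
    split at h
    · exact ih r h
    · split at h
      · exact (Option.some.inj h).symm
      · exact ih r h

theorem pvDeckA_some (v d : List (Int × Int)) (p : Int) :
    ∀ ds (hds : ∀ c, c ∈ ds → c ∈ d) r, pvLoopDeckA v d p ds hds = some r → r = p := by
  intro ds
  induction ds with
  | nil => intro hds r h; simp [pvLoopDeckA] at h
  | cons c rest ih =>
    intro hds r h
    rw [pvLoopDeckA] at h
    cases hs : pvLoopStackA v d p c (hds c List.mem_cons_self) v with
    | some r' =>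
      rw [hs] at h
      simp only [Option.some.injEq] at h
      subst h
      exact pvStackA_some v d p c _ v r' hs
    | none =>
      rw [hs] at h
      exact ih _ r h

-- the inner loop agrees with the boolean any-scan, given the outer induction hypothesis
theorem pvStackA_eq (v d : List (Int × Int)) (p : Int) (hp : p ≠ 0) (c : Int × Int) (hc : c ∈ d)
    (IH : ∀ v' d' p', d'.length < d.length →
      winner_best_play v' d' p' = if pvWinsN v' d' then p' else -p') :
    ∀ vs, pvLoopStackA v d p c hc vs = if pvAnyStackN v d c hc vs then some p else none := by
  intro vs
  induction vs with
  | nil => rw [pvLoopStackA, pvAnyStackN]; simp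
  | cons s rest ih =>
    rw [pvLoopStackA, pvAnyStackN]
    try dsimp only
    by_cases hcnd : s.2 = c.2 ∧ s.1 ≤ c.1
    · obtain ⟨h1, h2⟩ := hcnd
      rw [if_neg (c := s.2 ≠ c.2 ∨ s.1 > c.1) (by omega),
        if_pos (c := s.2 = c.2 ∧ s.1 ≤ c.1) ⟨h1, h2⟩]
      have hlt : (d.filter (fun x => x != c)).length < d.length := pvFilterNeLt c d hc
      rw [IH _ _ _ hlt]
      have hne : ¬(-p = p) := by omega
      have heq : -(-p) = p := by omega
      by_cases hw : pvWinsN (v.map (fun x => if x = s then c else x)) (d.filter (fun x => x != c)) = true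
      · simp [hw, hne, ih]
      · simp only [Bool.not_eq_true] at hw
        simp [hw, heq]
    · rw [if_pos (c := s.2 ≠ c.2 ∨ s.1 > c.1) (by omega),
        if_neg (c := s.2 = c.2 ∧ s.1 ≤ c.1) hcnd, ih]

theorem pvDeckA_eq (v d : List (Int × Int)) (p : Int) (hp : p ≠ 0)
    (IH : ∀ v' d' p', d'.length < d.length →
      winner_best_play v' d' p' = if pvWinsN v' d' then p' else -p') :
    ∀ ds (hds : ∀ c, c ∈ ds → c ∈ d),
      pvLoopDeckA v d p ds hds = if pvAnyDeckN v d ds hds then some p else none := by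
  intro ds
  induction ds with
  | nil => intro hds; rw [pvLoopDeckA, pvAnyDeckN]; simp
  | cons c rest ih =>
    intro hds
    rw [pvLoopDeckA, pvAnyDeckN]
    rw [pvStackA_eq v d p hp c _ IH v]
    by_cases hs : pvAnyStackN v d c (hds c List.mem_cons_self) v = true
    · simp [hs]
    · simp only [Bool.not_eq_true] at hs
      simp [hs, ih]

theorem pvA_aux : ∀ (n : Nat) (v d : List (Int × Int)) (p : Int), d.length ≤ n →
    winner_best_play v d p = if pvWinsN v d then p else -p := by
  intro n
  induction n with
  | zero =>
    intro v d p hd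
    have hdnil : d = [] := List.eq_nil_of_length_eq_zero (by omega)
    subst hdnil
    rw [winner_best_play, pvWinsN]
    simp
  | succ n ih =>
    intro v d p hd
    by_cases hp : p = 0
    · subst hp
      have hw : winner_best_play v d 0 = 0 := by
        rw [winner_best_play]
        split
        · norm_num
        · cases hres : pvLoopDeckA v d 0 d (fun _ h => h) with
          | none => simp
          | some r =>
            have := pvDeckA_some v d 0 d (fun _ h => h) r hres
            simp [this]
      rw [hw]
      by_cases h : pvWinsN v d = true <;> simp [h]
    · rw [winner_best_play, pvWinsN]
      by_cases hb : v = [] ∨ d = []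
      · simp [hb]
      · rw [if_neg hb, if_neg hb]
        have hIH : ∀ v' d' p', d'.length < d.length →
            winner_best_play v' d' p' = if pvWinsN v' d' then p' else -p' :=
          fun v' d' p' h => ih v' d' p' (by omega)
        rw [pvDeckA_eq v d p hp hIH d (fun _ h => h)]
        by_cases hany : pvAnyDeckN v d d (fun _ h => h) = true <;> simp [hany]

theorem pvA_eq_winsN (visible deck : List (Int × Int)) (player : Int) :
    winner_best_play visible deck player = if pvWinsN visible deck then player else -player :=
  pvA_aux deck.length visible deck player le_rfl

-- the memo table only ever stores true answers
def pvGood (memo : PySem.Dict (List (Int × Int) × List (Int × Int)) Bool) : Prop :=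
  ∀ v d b, memo.get? (v, d) = some b → b = pvWinsN v d

theorem pvStackB_eq (v d : List (Int × Int)) (c : Int × Int) (hc : c ∈ d)
    (IH : ∀ v' d' m', d'.length < d.length → pvGood m' →
      (pvWinsB v' d' m').1 = pvWinsN v' d' ∧ pvGood (pvWinsB v' d' m').2) :
    ∀ vs memo, pvGood memo →
      (pvAnyStackB v d c hc vs memo).1 = pvAnyStackN v d c hc vs ∧
      pvGood (pvAnyStackB v d c hc vs memo).2 := by
  intro vs
  induction vs with
  | nil => intro memo hg; rw [pvAnyStackB, pvAnyStackN]; exact ⟨rfl, hg⟩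
  | cons s rest ih =>
    intro memo hg
    rw [pvAnyStackB, pvAnyStackN]
    try dsimp only
    by_cases hcnd : s.2 = c.2 ∧ s.1 ≤ c.1
    · simp only [if_pos hcnd]
      have hlt : (d.filter (fun x => x != c)).length < d.length := pvFilterNeLt c d hc
      obtain ⟨hval, hgood⟩ := IH (v.map (fun x => if x = s then c else x))
        (d.filter (fun x => x != c)) memo hlt hg
      rw [hval]
      by_cases hw : pvWinsN (v.map (fun x => if x = s then c else x))
          (d.filter (fun x => x != c)) = true
      · simp only [hw, Bool.not_true, Bool.false_or]
        simpa using ih _ hgood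
      · simp only [Bool.not_eq_true] at hw
        simp [hw, hgood]
    · simp only [if_neg hcnd]
      exact ih memo hg

theorem pvDeckB_eq (v d : List (Int × Int))
    (IH : ∀ v' d' m', d'.length < d.length → pvGood m' →
      (pvWinsB v' d' m').1 = pvWinsN v' d' ∧ pvGood (pvWinsB v' d' m').2) :
    ∀ ds (hds : ∀ c, c ∈ ds → c ∈ d) memo, pvGood memo →
      (pvAnyDeckB v d ds hds memo).1 = pvAnyDeckN v d ds hds ∧
      pvGood (pvAnyDeckB v d ds hds memo).2 := by
  intro ds
  induction ds with
  | nil => intro hds memo hg; rw [pvAnyDeckB, pvAnyDeckN]; exact ⟨rfl, hg⟩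
  | cons c rest ih =>
    intro hds memo hg
    rw [pvAnyDeckB, pvAnyDeckN]
    try dsimp only
    obtain ⟨hval, hgood⟩ := pvStackB_eq v d c (hds c List.mem_cons_self) IH v memo hg
    by_cases hs : (pvAnyStackB v d c (hds c List.mem_cons_self) v memo).1 = true
    · rw [if_pos hs]
      have hsN : pvAnyStackN v d c (hds c List.mem_cons_self) v = true := hval.symm.trans hs
      exact ⟨by simp [hval, hsN], hgood⟩
    · rw [if_neg hs]
      have hsN : pvAnyStackN v d c (hds c List.mem_cons_self) v = false := by
        rw [← hval]; simpa using hs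
      obtain ⟨hval2, hgood2⟩ := ih _ _ hgood
      exact ⟨by simp [hval2, hsN], hgood2⟩

theorem pvB_aux : ∀ (n : Nat) (v d : List (Int × Int)) memo, d.length ≤ n → pvGood memo →
    (pvWinsB v d memo).1 = pvWinsN v d ∧ pvGood (pvWinsB v d memo).2 := by
  intro n
  induction n with
  | zero =>
    intro v d memo hd hg
    have hdnil : d = [] := List.eq_nil_of_length_eq_zero (by omega)
    subst hdnil
    rw [pvWinsB, pvWinsN]
    simpa using hg
  | succ n ih =>
    intro v d memo hd hg
    rw [pvWinsB, pvWinsN]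
    by_cases hb : v = [] ∨ d = []
    · rw [if_pos hb, if_pos hb]
      exact ⟨rfl, hg⟩
    · rw [if_neg hb, if_neg hb]
      have hIH : ∀ v' d' m', d'.length < d.length → pvGood m' →
          (pvWinsB v' d' m').1 = pvWinsN v' d' ∧ pvGood (pvWinsB v' d' m').2 :=
        fun v' d' m' h => ih v' d' m' (by omega)
      cases hmem : memo.get? (v, d) with
      | some b =>
        dsimp only
        refine ⟨?_, hg⟩
        rw [hg v d b hmem, pvWinsN, if_neg hb]
      | none =>
        dsimp only
        obtain ⟨hval, hgood⟩ := pvDeckB_eq v d hIH d (fun _ h => h) memo hg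
        refine ⟨hval, ?_⟩
        intro v' d' b hb'
        rw [PySem.Dict.get?_insert] at hb'
        split at hb'
        · rename_i heq
          obtain ⟨rfl, rfl⟩ := Prod.mk.injEq .. ▸ heq
          cases hb'
          rw [hval, pvWinsN, if_neg hb]
        · exact hgood v' d' b hb'

theorem pvB_eq_winsN (visible deck : List (Int × Int))
    (memo : PySem.Dict (List (Int × Int) × List (Int × Int)) Bool) (hg : pvGood memo) :
    (pvWinsB visible deck memo).1 = pvWinsN visible deck ∧ pvGood (pvWinsB visible deck memo).2 :=
  pvB_aux deck.length visible deck memo le_rfl hg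

-- ===== VERDICT (by name: the statement is the Claim_ definition above) =====
theorem winner_best_play_spec : Claim_equal_winner_best_play := by
  intro visible deck player _
  unfold Spec_winner_best_play winner_best_play_alt
  rw [pvA_eq_winsN,
    (pvB_eq_winsN visible deck PySem.Dict.empty (by intro v d b h; simp [PySem.Dict.get?_empty] at h)).1]
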